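-- pv_equiv track=rewrite | github.com/mlouielu/twstock | twstock/legacy.py | cal_continue
-- ===== SOURCE A (Python) =====
-- def cal_continue(list_data):
--     """ 計算持續天數
--
--         :rtype: int
--         :returns: 向量數值：正數向上、負數向下。
--     """
--     diff_data = []
--     for i in range(1, len(list_data)):
--         if list_data[-i] > list_data[-i - 1]:
--             diff_data.append(1)
--         else:
--             diff_data.append(-1)
--     cont = 0
--     for value in diff_data:
--         if value == diff_data[0]:
--             cont += 1
--         else:
--             break
--     return cont * diff_data[0]
-- ===== SOURCE B (Python) =====
-- def cal_continue(list_data):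
--     """Single fused pass: compute the latest direction once, then count
--     adjacent pairs from the end that continue it."""
--     first = 1 if list_data[-1] > list_data[-2] else -1
--     counter = 0
--     for i in range(1, len(list_data)):
--         direction = 1 if list_data[-i] > list_data[-i - 1] else -1
--         if direction != first:
--             break
--         counter += 1
--     return counter * first
-- ===== Notes on version B (the rewrite author's own statement) =====
-- stated objective: simpler
-- what changed: B computes the most-recent direction once and counts continuation days in a single fused loop with early break, instead of first materialising the full diff list and then scanning it against its head.
import Mathlib
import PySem

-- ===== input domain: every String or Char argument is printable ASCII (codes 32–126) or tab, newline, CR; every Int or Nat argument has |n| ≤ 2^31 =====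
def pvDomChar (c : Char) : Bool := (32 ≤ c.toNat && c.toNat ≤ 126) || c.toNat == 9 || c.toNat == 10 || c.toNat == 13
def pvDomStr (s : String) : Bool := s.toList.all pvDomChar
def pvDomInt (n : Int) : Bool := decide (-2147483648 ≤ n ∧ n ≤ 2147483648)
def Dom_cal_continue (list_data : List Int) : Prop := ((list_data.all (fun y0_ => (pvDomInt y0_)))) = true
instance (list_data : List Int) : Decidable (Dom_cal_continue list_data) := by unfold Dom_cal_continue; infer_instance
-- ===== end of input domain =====

-- B computes the most-recent direction once and counts continuation days in one fused loop
-- with early break (O(1) extra space), instead of building the full diff list and scanning it.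


-- ===== PORT A =====
-- 'for value in diff_data: if value == diff_data[0]: cont += 1 else: break'
def pvContA (d0 : Int) : List Int → Int
  | [] => 0
  | v :: rest => if v = d0 then 1 + pvContA d0 rest else 0

def cal_continue (list_data : List Int) : Int :=
  let diff_data :=
    (PySem.List.pyRange 1 (list_data.length : Int) 1).foldl
      (fun acc i =>
        acc ++ [if PySem.List.pyGetD list_data (-i) 0 > PySem.List.pyGetD list_data (-i - 1) 0
                then (1 : Int) else -1]) []
  pvContA (PySem.List.pyGetD diff_data 0 0) diff_data * PySem.List.pyGetD diff_data 0 0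

-- ===== PORT B =====
-- 'for i in range(1, len): direction = …; if direction != first: break; counter += 1'
def pvCountB (xs : List Int) (first : Int) : List Int → Int
  | [] => 0
  | i :: rest =>
    if (if PySem.List.pyGetD xs (-i) 0 > PySem.List.pyGetD xs (-i - 1) 0 then (1 : Int) else -1) ≠ first
    then 0 else 1 + pvCountB xs first rest

def cal_continue_alt (list_data : List Int) : Int :=
  let first : Int := if PySem.List.pyGetD list_data (-1) 0 > PySem.List.pyGetD list_data (-2) 0 then 1 else -1
  pvCountB list_data first (PySem.List.pyRange 1 (list_data.length : Int) 1) * first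

-- ===== PRECONDITION & SPEC =====
-- Pre_ excludes lists of length < 2, on which both Pythons raise IndexError
-- (A on diff_data[0], B on list_data[-2]).
def Pre_cal_continue (list_data : List Int) : Prop := 2 ≤ list_data.length
instance (list_data : List Int) : Decidable (Pre_cal_continue list_data) := by
  unfold Pre_cal_continue; infer_instance

def pvWitness_cal_continue : List Int := [3, 1, 2]

def Spec_cal_continue (list_data : List Int) (out : Int) : Prop := out = cal_continue_alt list_data
instance (list_data : List Int) (out : Int) : Decidable (Spec_cal_continue list_data out) := by
  unfold Spec_cal_continue; infer_instance

-- ===== CLAIM (what is proved, stated in full; the proofs are below) =====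
def Claim_equal_cal_continue : Prop := ∀ (list_data : List Int), Dom_cal_continue list_data → Pre_cal_continue list_data → Spec_cal_continue list_data (cal_continue list_data)

-- ===== LEMMAS AND PROOFS =====

-- A's scan of the materialised diff list equals B's fused counting loop over the index range.
theorem pvContA_map_eq_pvCountB (xs : List Int) (c : Int) (l : List Int) :
    pvContA c (l.map (fun i =>
      if PySem.List.pyGetD xs (-i) 0 > PySem.List.pyGetD xs (-i - 1) 0 then (1 : Int) else -1)) =
    pvCountB xs c l := by
  induction l with
  | nil => rfl
  | cons i rest ih =>
    simp only [List.map_cons, pvContA, pvCountB, ne_eq, ite_not, ih]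

theorem pvHead_getD (a : Int) (l : List Int) : PySem.List.pyGetD (a :: l) 0 0 = a := by
  simp [PySem.List.pyGetD, PySem.List.pyGet?, PySem.List.pyIdx?]

-- ===== VERDICT (by name: the statement is the Claim_ definition above) =====
theorem cal_continue_spec : Claim_equal_cal_continue := by
  intro xs _ hpre
  unfold Spec_cal_continue cal_continue cal_continue_alt
  have h2 : (1 : Int) < (xs.length : Int) := by
    unfold Pre_cal_continue at hpre; exact_mod_cast hpre
  rw [PySem.List.foldl_append_singleton_eq_map, PySem.List.pyRange_one_cons h2]
  simp only [List.nil_append, List.map_cons, pvHead_getD]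
  norm_num
  have key := pvContA_map_eq_pvCountB xs
    (if PySem.List.pyGetD xs (-2) 0 < PySem.List.pyGetD xs (-1) 0 then (1 : Int) else -1)
    (1 :: PySem.List.pyRange 2 (xs.length : Int) 1)
  simp only [List.map_cons] at key
  norm_num at key
  rw [key]
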